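-- pv_equiv track=rewrite | github.com/KikoNet13/SpiritPlanner | app/utils/router.py | build_route_stack
-- ===== SOURCE A (Python) =====
-- def normalize_route(route: str | None) -> str:
--     if not route:
--         return "/eras"
--     normalized = route.strip()
--     if not normalized.startswith("/"):
--         normalized = f"/{normalized}"
--     if normalized.endswith("/") and normalized != "/":
--         normalized = normalized.rstrip("/")
--     if not normalized or normalized == "/":
--         return "/eras"
--     return normalized
--
-- def build_route_stack(route: str) -> list[str]:
--     normalized = normalize_route(route)
--     parts = [part for part in normalized.split("/") if part]
--     if not parts or parts[0] != "eras":
--         return ["/eras"]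
--
--     routes = ["/eras"]
--     if len(parts) < 2:
--         return routes
--
--     era_id = parts[1]
--     routes.append(f"/eras/{era_id}")
--
--     if len(parts) == 2:
--         return routes
--
--     if len(parts) < 4 or parts[2] != "periods":
--         return ["/eras"]
--
--     period_id = parts[3]
--     routes.append(f"/eras/{era_id}/periods/{period_id}")
--
--     if len(parts) == 4:
--         return routes
--
--     if len(parts) == 6 and parts[4] == "incursions":
--         incursion_id = parts[5]
--         routes.append(
--             f"/eras/{era_id}/periods/{period_id}/incursions/{incursion_id}"
--         )
--         return routes
--
--     return ["/eras"]
-- ===== SOURCE B (Python) =====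
-- def normalize_route(route):
--     if not route:
--         return "/eras"
--     normalized = route.strip()
--     if not normalized.startswith("/"):
--         normalized = f"/{normalized}"
--     if normalized.endswith("/") and normalized != "/":
--         normalized = normalized.rstrip("/")
--     if not normalized or normalized == "/":
--         return "/eras"
--     return normalized
--
-- LITERALS = {0: "eras", 2: "periods", 4: "incursions"}
--
-- def build_route_stack(route):
--     normalized = normalize_route(route)
--     parts = [p for p in normalized.split("/") if p]
--     if len(parts) not in (1, 2, 4, 6):
--         return ["/eras"]
--     prefix = ""
--     routes = []
--     for i, part in enumerate(parts):
--         prefix = f"{prefix}/{part}"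
--         if i in LITERALS:
--             if part != LITERALS[i]:
--                 return ["/eras"]
--             if i == 0:
--                 routes.append(prefix)
--         else:
--             routes.append(prefix)
--     return routes
-- ===== Notes on version B (the rewrite author's own statement) =====
-- stated objective: alternative
-- what changed: Replaces A's hardcoded chain of length/index branch checks with one length-membership test plus a single loop over the parts driven by a position schema (even positions expect fixed literals, odd positions are ids), accumulating a growing prefix string.
import Mathlib
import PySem

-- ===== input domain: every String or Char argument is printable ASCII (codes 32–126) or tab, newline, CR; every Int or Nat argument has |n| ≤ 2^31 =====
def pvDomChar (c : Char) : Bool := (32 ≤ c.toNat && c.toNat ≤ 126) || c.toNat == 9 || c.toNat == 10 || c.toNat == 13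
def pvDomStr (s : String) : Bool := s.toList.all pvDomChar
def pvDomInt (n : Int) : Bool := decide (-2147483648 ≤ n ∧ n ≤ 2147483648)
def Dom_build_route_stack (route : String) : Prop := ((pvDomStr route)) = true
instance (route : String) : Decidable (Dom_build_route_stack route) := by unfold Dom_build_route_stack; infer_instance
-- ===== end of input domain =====

-- B replaces A's hardcoded chain of length/index branches by one length test plus a single
-- schema-driven loop accumulating a prefix (objective: alternative decomposition, same cost).

-- ===== PORT A =====
-- normalized.rstrip("/"): strip '/' characters from the right end only (exact hand port of str.rstrip("/"))
def pvRstripSlash (s : String) : String :=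
  String.ofList ((s.toList.reverse.dropWhile (fun c => c = '/')).reverse)

def normalize_route (route : String) : String :=
  if route = "" then "/eras"
  else
    let n1 := PySem.Str.strip route
    let n2 := if ¬ (PySem.Str.startswith n1 "/") then "/" ++ n1 else n1
    let n3 := if PySem.Str.endswith n2 "/" ∧ n2 ≠ "/" then pvRstripSlash n2 else n2
    if n3 = "" ∨ n3 = "/" then "/eras" else n3

-- A's code after `parts` is built (parts = the nonempty '/'-separated components)
def pvStackA (parts : List String) : List String :=
  match parts with
  | [] => ["/eras"]                                   -- `not parts` short-circuits parts[0]
  | p0 :: _ =>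
    if p0 ≠ "eras" then ["/eras"]
    else
      let routes := ["/eras"]
      if parts.length < 2 then routes
      else
        let era_id := parts.getD 1 ""                 -- in range: length ≥ 2
        let routes := routes ++ ["/eras/" ++ era_id]
        if parts.length = 2 then routes
        else if parts.length < 4 ∨ parts.getD 2 "" ≠ "periods" then ["/eras"]
        else
          let period_id := parts.getD 3 ""            -- in range: length ≥ 4
          let routes := routes ++ ["/eras/" ++ era_id ++ "/periods/" ++ period_id]
          if parts.length = 4 then routes
          else if parts.length = 6 ∧ parts.getD 4 "" = "incursions" then
            routes ++ ["/eras/" ++ era_id ++ "/periods/" ++ period_id ++ "/incursions/" ++ parts.getD 5 ""]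
          else ["/eras"]

-- s.split("/"): split? is none only for sep = "", so .getD [] is never the default
def build_route_stack (route : String) : List String :=
  let normalized := normalize_route route
  let parts := ((PySem.Str.split? normalized "/").getD []).filter (fun p => p ≠ "")
  pvStackA parts

-- ===== PORT B =====
def pvLiterals : PySem.Dict Int String :=
  ((PySem.Dict.empty.insert 0 "eras").insert 2 "periods").insert 4 "incursions"

-- the for-loop of B: early `return ["/eras"]` is `none`
def pvAltGo : Int → List String → String → List String → Option (List String)
  | _, [], _, routes => some routes
  | i, part :: rest, pref, routes =>
    let pref := pref ++ "/" ++ part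
    match pvLiterals.get? i with
    | some lit =>
      if part ≠ lit then none
      else pvAltGo (i + 1) rest pref (if i = 0 then routes ++ [pref] else routes)
    | none => pvAltGo (i + 1) rest pref (routes ++ [pref])

def pvStackB (parts : List String) : List String :=
  if ¬ ([(1 : Int), 2, 4, 6].contains (parts.length : Int)) then ["/eras"]
  else
    match pvAltGo 0 parts "" [] with
    | some routes => routes
    | none => ["/eras"]

def build_route_stack_alt (route : String) : List String :=
  let normalized := normalize_route route
  let parts := ((PySem.Str.split? normalized "/").getD []).filter (fun p => p ≠ "")
  pvStackB parts

-- ===== PRECONDITION & SPEC =====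
def Spec_build_route_stack (route : String) (out : List String) : Prop := out = build_route_stack_alt route
instance (route : String) (out : List String) : Decidable (Spec_build_route_stack route out) := by unfold Spec_build_route_stack; infer_instance

-- ===== CLAIM (what is proved, stated in full; the proofs are below) =====
def Claim_equal_build_route_stack : Prop := ∀ (route : String), Dom_build_route_stack route → Spec_build_route_stack route (build_route_stack route)

-- ===== LEMMAS AND PROOFS =====

theorem pvLit0 : pvLiterals.get? 0 = some "eras" := rfl
theorem pvLit1 : pvLiterals.get? 1 = none := rfl
theorem pvLit2 : pvLiterals.get? 2 = some "periods" := rfl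
theorem pvLit3 : pvLiterals.get? 3 = none := rfl
theorem pvLit4 : pvLiterals.get? 4 = some "incursions" := rfl
theorem pvLit5 : pvLiterals.get? 5 = none := rfl

-- the two tails agree on every parts list
theorem pvStack_eq (ps : List String) : pvStackA ps = pvStackB ps := by
  match ps with
  | [] => rfl
  | [a] =>
      simp only [pvStackA, pvStackB, pvAltGo, pvLit0]
      by_cases h : a = "eras" <;> simp [h]
  | [a, b] =>
      simp only [pvStackA, pvStackB, pvAltGo, pvLit0, pvLit1, Int.reduceAdd]
      by_cases h : a = "eras" <;> simp [h]
  | [a, b, c] =>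
      simp only [pvStackA, pvStackB]
      by_cases h : a = "eras" <;> simp [h]
  | [a, b, c, d] =>
      simp only [pvStackA, pvStackB, pvAltGo, pvLit0, pvLit1, pvLit2, pvLit3, Int.reduceAdd]
      by_cases h : a = "eras" <;> by_cases h2 : c = "periods" <;> simp [h, h2, String.append_assoc]
  | [a, b, c, d, e] =>
      simp only [pvStackA, pvStackB]
      by_cases h : a = "eras" <;> by_cases h2 : c = "periods" <;> simp [h, h2]
  | [a, b, c, d, e, f] =>
      simp only [pvStackA, pvStackB, pvAltGo, pvLit0, pvLit1, pvLit2, pvLit3, pvLit4, pvLit5,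
        Int.reduceAdd]
      by_cases h : a = "eras" <;> by_cases h2 : c = "periods" <;> by_cases h3 : e = "incursions" <;>
        simp [h, h2, h3, String.append_assoc]
  | a :: b :: c :: d :: e :: f :: g :: rest =>
      simp only [pvStackA, pvStackB]
      by_cases h : a = "eras" <;> by_cases h2 : c = "periods" <;>
        simp [h, h2, List.length_cons] <;> omega

-- ===== VERDICT (by name: the statement is the Claim_ definition above) =====
theorem build_route_stack_spec : Claim_equal_build_route_stack := by
  intro route _
  unfold Spec_build_route_stack build_route_stack build_route_stack_alt
  exact pvStack_eq _
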